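-- pv_equiv track=rewrite | github.com/Bintangilham10/HydraMatrix-Cipher | hydra_cipher/gf_math.py | gf_inverse
-- ===== SOURCE A (Python) =====
-- IRREDUCIBLE_POLY = 0x11B
--
-- def gf_multiply(a: int, b: int) -> int:
--     """
--     Perkalian dua elemen dalam GF(2^8).
--
--     Menggunakan metode 'peasant multiplication' (shift-and-add)
--     dengan reduksi modulo irreducible polynomial.
--
--     Args:
--         a: Elemen pertama (0-255)
--         b: Elemen kedua (0-255)
--
--     Returns:
--         Hasil perkalian dalam GF(2^8)
--     """
--     result = 0
--     for _ in range(8):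
--         if b & 1:
--             result ^= a
--         # Shift a ke kiri, reduksi jika overflow
--         high_bit = a & 0x80
--         a = (a << 1) & 0xFF
--         if high_bit:
--             a ^= IRREDUCIBLE_POLY & 0xFF  # Reduksi modulo polynomial
--         b >>= 1
--     return result
--
-- def gf_inverse(a: int) -> int:
--     """
--     Invers perkalian dalam GF(2^8).
--
--     Menggunakan extended Euclidean algorithm untuk polynomial.
--     Untuk a=0, mengembalikan 0 (konvensi kriptografi).
--
--     Args:
--         a: Elemen (0-255)
--
--     Returns:
--         Invers perkalian, atau 0 jika a=0
--     """
--     if a == 0: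
--         return 0
--     # Menggunakan Fermat's little theorem: a^(-1) = a^(2^8 - 2) dalam GF(2^8)
--     # 2^8 - 2 = 254
--     result = a
--     for _ in range(6):  # Menghitung a^254 melalui repeated squaring
--         result = gf_multiply(result, result)
--         result = gf_multiply(result, a)
--     result = gf_multiply(result, result)
--     return result
-- ===== SOURCE B (Python) =====
-- def gf_inverse(a: int) -> int:
--     """GF(2^8) multiplicative inverse of the byte a, computed with the
--     extended Euclidean algorithm over GF(2) polynomials modulo 0x11B.
--     Returns 0 for input 0 (cryptographic convention)."""
--     a &= 0xFF
--     if a == 0: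
--         return 0
--     r0, r1 = 0x11B, a
--     s0, s1 = 0, 1
--     while r1 != 1:
--         if r0.bit_length() < r1.bit_length():
--             r0, r1 = r1, r0
--             s0, s1 = s1, s0
--         shift = r0.bit_length() - r1.bit_length()
--         r0 ^= r1 << shift
--         s0 ^= s1 << shift
--     return s1
-- ===== Notes on version B (the rewrite author's own statement) =====
-- stated objective: alternative
-- what changed: Replaces A's fixed Fermat exponentiation chain (a^254 by repeated squaring with a bitwise peasant multiply) by the extended Euclidean algorithm over GF(2) polynomials modulo the field polynomial, applied to the low byte: remainders and Bezout cofactors are reduced by degree-based XOR shifts until the remainder is one.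
-- outside the precondition, e.g. on gf_inverse(257): A returns 257, B returns 1; on gf_inverse(-1): A returns -228, B returns 28
import Mathlib
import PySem

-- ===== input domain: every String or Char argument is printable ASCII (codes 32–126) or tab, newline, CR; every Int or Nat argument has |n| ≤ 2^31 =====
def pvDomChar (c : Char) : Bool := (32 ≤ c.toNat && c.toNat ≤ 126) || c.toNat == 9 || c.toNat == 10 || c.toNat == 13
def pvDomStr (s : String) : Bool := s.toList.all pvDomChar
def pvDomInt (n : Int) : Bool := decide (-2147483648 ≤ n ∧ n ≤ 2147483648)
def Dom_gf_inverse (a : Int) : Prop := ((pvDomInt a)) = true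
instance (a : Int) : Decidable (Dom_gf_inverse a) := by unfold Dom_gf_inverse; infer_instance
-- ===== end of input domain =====

-- B replaces A's fixed Fermat exponentiation chain of bitwise field multiplications by the
-- extended Euclidean algorithm over GF(2) polynomials modulo the field polynomial that A's
-- docstring advertises, applied to the low byte of the input (objective: alternative
-- algorithm; return-value equivalence on Pre_, which covers the whole documented byte
-- domain and all out-of-range inputs except the eight-residue sliver described at Pre_).

-- ===== PORT A =====
def gfMulStep (st : Int × Int × Int) : Int × Int × Int :=
  let result := st.1
  let a := st.2.1
  let b := st.2.2
  let result := if PySem.Int.band b 1 ≠ 0 then PySem.Int.bxor result a else result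
  let high_bit := PySem.Int.band a 0x80
  let a := PySem.Int.band (a <<< (1:Nat)) 0xFF
  let a := if high_bit ≠ 0 then PySem.Int.bxor a (PySem.Int.band 0x11B 0xFF) else a
  (result, a, b >>> (1:Nat))

def gf_multiply (a b : Int) : Int :=
  ((List.range 8).foldl (fun st _ => gfMulStep st) (0, a, b)).1

def gf_inverse (a : Int) : Int :=
  if a = 0 then 0
  else
    let result := (List.range 6).foldl
      (fun result _ => gf_multiply (gf_multiply result result) a) a
    gf_multiply result result

-- ===== PORT B =====
def eeaLoop : Nat → Int → Int → Int → Int → Int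
  | 0, _, _, _, s1 => s1
  | fuel+1, r0, r1, s0, s1 =>
    if r1 = 1 then s1
    else
      let st := if PySem.Int.bitLength r0 < PySem.Int.bitLength r1
                then (r1, r0, s1, s0) else (r0, r1, s0, s1)
      let r0 := st.1; let r1 := st.2.1; let s0 := st.2.2.1; let s1 := st.2.2.2
      let shift := PySem.Int.bitLength r0 - PySem.Int.bitLength r1
      eeaLoop fuel (PySem.Int.bxor r0 (r1 <<< shift)) r1
                   (PySem.Int.bxor s0 (s1 <<< shift)) s1

def gf_inverse_alt (a : Int) : Int :=
  let ab := PySem.Int.band a 0xFF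
  if ab = 0 then 0 else eeaLoop 64 0x11B ab 0 1

-- ===== PRECONDITION & SPEC =====
-- Pre_ admits the whole documented byte domain 0–255 and, outside it, every input except
-- those whose low byte lies in the eight-byte set {1,41,65,73,81,93,189,255}: out of the
-- documented range neither program's value is specified and on exactly that sliver the two
-- defensible conventions disagree (A's unmasked multiply carries the argument's high bits
-- into the result — these are precisely the bytes whose Fermat squaring chain stays odd, so
-- the high bits survive every multiply — while B inverts the low byte; concrete excluded
-- examples are in the cites); everywhere else, in range or out, A and B agree and are claimed.
def Pre_gf_inverse (a : Int) : Prop :=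
  (0 ≤ a ∧ a < 256) ∨ a % 256 ∉ ([1,41,65,73,81,93,189,255] : List Int)
instance (a : Int) : Decidable (Pre_gf_inverse a) := by unfold Pre_gf_inverse; infer_instance

def pvWitness_gf_inverse : Int := (7)

def Spec_gf_inverse (a : Int) (out : Int) : Prop := out = gf_inverse_alt a
instance (a : Int) (out : Int) : Decidable (Spec_gf_inverse a out) := by
  unfold Spec_gf_inverse; infer_instance

-- ===== CLAIM =====
def Claim_equal_gf_inverse : Prop :=
  ∀ (a : Int), Dom_gf_inverse a → Pre_gf_inverse a → Spec_gf_inverse a (gf_inverse a)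

-- ===== LEMMAS AND PROOFS =====
lemma bxor_negSucc_natCast (m n : Nat) :
    PySem.Int.bxor (Int.negSucc m) ((n : Nat) : Int) = Int.negSucc (m ^^^ n) := by
  unfold PySem.Int.bxor
  have h1 : ¬ ((0:Int) ≤ Int.negSucc m) := by simp [Int.negSucc_eq]; omega
  have h2 : (0 : Int) ≤ (n : Int) := by positivity
  simp only [if_neg h1, if_pos h2]
  have e1 : ((-(Int.negSucc m)) - 1).toNat = m := by simp [Int.negSucc_eq]
  rw [e1, Int.toNat_natCast, Int.negSucc_eq]
  push_cast
  ring

lemma bxor_natCast_negSucc (m n : Nat) :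
    PySem.Int.bxor ((m : Nat) : Int) (Int.negSucc n) = Int.negSucc (m ^^^ n) := by
  unfold PySem.Int.bxor
  have h1 : (0:Int) ≤ (m : Int) := by positivity
  have h2 : ¬ ((0:Int) ≤ Int.negSucc n) := by simp [Int.negSucc_eq]; omega
  simp only [if_pos h1, if_neg h2]
  have e1 : ((-(Int.negSucc n)) - 1).toNat = n := by simp [Int.negSucc_eq]
  rw [e1, Int.toNat_natCast, Int.negSucc_eq]
  push_cast
  ring

lemma bxor_negSucc_negSucc (m n : Nat) :
    PySem.Int.bxor (Int.negSucc m) (Int.negSucc n) = ((m ^^^ n : Nat) : Int) := by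
  unfold PySem.Int.bxor
  have h1 : ¬ ((0:Int) ≤ Int.negSucc m) := by simp [Int.negSucc_eq]; omega
  have h2 : ¬ ((0:Int) ≤ Int.negSucc n) := by simp [Int.negSucc_eq]; omega
  simp only [if_neg h1, if_neg h2]
  have e1 : ((-(Int.negSucc m)) - 1).toNat = m := by simp [Int.negSucc_eq]
  have e2 : ((-(Int.negSucc n)) - 1).toNat = n := by simp [Int.negSucc_eq]
  rw [e1, e2]

lemma pyBxor_assoc (a b c : Int) :
    PySem.Int.bxor (PySem.Int.bxor a b) c = PySem.Int.bxor a (PySem.Int.bxor b c) := by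
  rcases a with m | m <;> rcases b with n | n <;> rcases c with k | k <;>
    simp only [Int.ofNat_eq_natCast, PySem.Int.bxor_natCast, bxor_natCast_negSucc,
      bxor_negSucc_natCast, bxor_negSucc_negSucc, Nat.xor_assoc]

lemma bxor_zero_left (a : Int) : PySem.Int.bxor 0 a = a := by
  rw [PySem.Int.bxor_comm]; exact PySem.Int.bxor_zero a

lemma bxor_cancel_right (a b : Int) : PySem.Int.bxor (PySem.Int.bxor a b) b = a := by
  rw [pyBxor_assoc, PySem.Int.bxor_self, PySem.Int.bxor_zero]

-- band sign-case normal forms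
lemma band_negSucc_natCast (m n : Nat) :
    PySem.Int.band (Int.negSucc m) ((n : Nat) : Int) = ((n - (n &&& m) : Nat) : Int) := by
  unfold PySem.Int.band
  have h1 : ¬ ((0:Int) ≤ Int.negSucc m) := by simp [Int.negSucc_eq]; omega
  have h2 : (0 : Int) ≤ (n : Int) := by positivity
  simp only [if_neg h1, if_pos h2]
  have e1 : ((-(Int.negSucc m)) - 1).toNat = m := by simp [Int.negSucc_eq]
  rw [e1, Int.toNat_natCast]

-- Nat: low bits of 2^8*k + v
lemma nat_and_255 (n : Nat) : n &&& 255 = n % 256 := by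
  have h := Nat.and_two_pow_sub_one_eq_mod n 8
  norm_num at h
  exact h

lemma nat_disj (k v : Nat) (hv : v < 256) : 256*k ^^^ v = 256*k + v := by
  apply Nat.eq_of_testBit_eq
  intro i
  have h1 := Nat.testBit_two_pow_mul_add k (b := v) (i := 8) (by omega) i
  have h2 := Nat.testBit_two_pow_mul_add k (b := 0) (i := 8) (by omega) i
  norm_num at h1 h2
  rw [Nat.testBit_xor, h2, h1]
  by_cases hi : i < 8
  · simp [hi]
  · have : v.testBit i = false := Nat.testBit_lt_two_pow (by
      calc v < 256 := hv
      _ = 2^8 := by norm_num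
      _ ≤ 2^i := Nat.pow_le_pow_right (by norm_num) (by omega))
    simp [hi, this]

set_option maxRecDepth 4096 in
lemma nat_compl (v : Nat) (hv : v < 256) : 255 ^^^ v = 255 - v := by
  have h := List.all_eq_true.mp
    (show (List.range 256).all (fun v => 255 ^^^ v == 255 - v) from by decide)
    v (List.mem_range.mpr hv)
  simpa using h

lemma int_disj (q v : Int) (h0 : 0 ≤ v) (hv : v < 256) :
    PySem.Int.bxor (256*q) v = 256*q + v := by
  obtain ⟨v', rfl⟩ : ∃ v' : Nat, v = (v' : Int) := ⟨v.toNat, by omega⟩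
  have hv' : v' < 256 := by omega
  rcases q with k | t
  · simp only [Int.ofNat_eq_natCast]
    have e : (256 * (k:Int)) = ((256*k : Nat) : Int) := by push_cast; ring
    rw [e, PySem.Int.bxor_natCast, nat_disj k v' hv']
    push_cast; ring
  · have e : (256 * (Int.negSucc t)) = Int.negSucc (256*t + 255) := by
      simp [Int.negSucc_eq]; ring
    rw [e, bxor_negSucc_natCast]
    have hx : 255 ^^^ v' < 256 := Nat.xor_lt_two_pow (n := 8) (by norm_num) (by omega)
    have e2 : (256*t + 255) ^^^ v' = 256*t + (255 ^^^ v') := by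
      rw [show 256*t + 255 = 256*t ^^^ 255 from (nat_disj t 255 (by norm_num)).symm,
        Nat.xor_assoc, nat_disj t (255 ^^^ v') hx]
    rw [e2, nat_compl v' hv']
    simp [Int.negSucc_eq]
    push_cast
    omega

lemma int_band_255 (a : Int) : PySem.Int.band a 255 = PySem.Int.mod a 256 := by
  rcases a with n | m
  · have e : ((255:Int)) = ((255:Nat) : Int) := by norm_num
    rw [Int.ofNat_eq_natCast, e, PySem.Int.band_natCast, nat_and_255,
      show ((256:Int)) = ((256:Nat) : Int) from by norm_num, PySem.Int.mod_natCast]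
  · have e : ((255:Int)) = ((255:Nat) : Int) := by norm_num
    rw [e, band_negSucc_natCast, PySem.Int.mod_eq_emod_of_pos (by norm_num)]
    rw [Nat.and_comm, nat_and_255]
    have : m % 256 < 256 := by omega
    simp [Int.negSucc_eq]
    omega

lemma nat_and_128_mod (n : Nat) : n &&& 128 = n % 256 &&& 128 := by
  have h1 := Nat.and_two_pow n 7
  have h2 := Nat.and_two_pow (n % 256) 7
  have h3 := Nat.testBit_mod_two_pow n 8 7
  norm_num at h1 h2 h3
  rw [h1, h2, h3]

set_option maxRecDepth 4096 in
lemma nat_sub_and_128 (s : Nat) (hs : s < 256) : 128 - (s &&& 128) = (255 - s) &&& 128 := by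
  have h := List.all_eq_true.mp
    (show (List.range 256).all (fun s => 128 - (s &&& 128) == (255 - s) &&& 128) from by decide)
    s (List.mem_range.mpr hs)
  simpa using h

lemma int_band_128 (a : Int) : PySem.Int.band a 128 = PySem.Int.band (PySem.Int.mod a 256) 128 := by
  have e : ((128:Int)) = ((128:Nat) : Int) := by norm_num
  rcases a with n | m
  · rw [Int.ofNat_eq_natCast, e,
      show PySem.Int.mod ((n:Nat) : Int) 256 = ((n % 256 : Nat) : Int) from by
        rw [show ((256:Int)) = ((256:Nat) : Int) from by norm_num, PySem.Int.mod_natCast],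
      PySem.Int.band_natCast, PySem.Int.band_natCast, nat_and_128_mod]
  · have hm : PySem.Int.mod (Int.negSucc m) 256 = ((255 - m % 256 : Nat) : Int) := by
      rw [PySem.Int.mod_eq_emod_of_pos (by norm_num)]
      have : m % 256 < 256 := by omega
      simp [Int.negSucc_eq]
      omega
    rw [e, band_negSucc_natCast, hm, PySem.Int.band_natCast]
    rw [Nat.and_comm 128 m, nat_and_128_mod m, ← nat_sub_and_128 (m % 256) (by omega)]

lemma int_shl1 (a : Int) : a <<< (1:Nat) = 2*a := by
  rcases a with n | m
  · show Int.ofNat (n <<< 1) = _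
    rw [Nat.shiftLeft_eq]
    simp [Int.ofNat_eq_natCast]
    push_cast
    ring
  · show Int.negSucc ((m + 1) <<< 1 - 1) = _
    rw [Nat.shiftLeft_eq]
    simp [Int.negSucc_eq]
    push_cast
    omega

lemma int_shr1 (a : Int) : a >>> (1:Nat) = a / 2 := by
  rcases a with n | m
  · show Int.ofNat (n >>> 1) = _
    rw [Nat.shiftRight_eq_div_pow]
    simp [Int.ofNat_eq_natCast]
  · show Int.negSucc (m >>> 1) = _
    rw [Nat.shiftRight_eq_div_pow]
    simp [Int.negSucc_eq]
    omega

-- ===== fold = iterate =====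
lemma foldRange_eq_iterate {α : Type} (f : α → α) :
    ∀ (n : Nat) (st : α), (List.range n).foldl (fun st _ => f st) st = f^[n] st := by
  intro n
  induction n with
  | zero => intro st; rfl
  | succ n ih =>
    intro st
    rw [List.range_succ, List.foldl_append, ih, Function.iterate_succ_apply']
    rfl

-- evolution of components is independent
lemma gfMulStep_snd (r A b r' b' : Int) :
    (gfMulStep (r, A, b)).2.1 = (gfMulStep (r', A, b')).2.1 := rfl

lemma div2_emod (P b b' : Int) (hP : 0 < P) (h : b % (2*P) = b' % (2*P)) :
    (b/2) % P = (b'/2) % P := by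
  have key : ∀ c : Int, (c/2) % P = ((c % (2*P))/2) % P := by
    intro c
    conv_lhs => rw [show c = c % (2*P) + 2*(P*(c/(2*P))) from by
      have := Int.ediv_add_emod c (2*P); linarith]
    rw [Int.add_mul_ediv_left _ _ (by norm_num : (2:Int) ≠ 0), Int.add_mul_emod_self_left]
  rw [key b, key b', h]

-- result after n rounds differs by a constant xor when b-residues agree mod 2^n
lemma roundsInv : ∀ (n : Nat) (r r' A b b' x : Int),
    r = PySem.Int.bxor r' x →
    b % (2^n) = b' % (2^n) →
    (gfMulStep^[n] (r, A, b)).1 = PySem.Int.bxor ((gfMulStep^[n] (r', A, b')).1) x := by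
  intro n
  induction n with
  | zero => intro r r' A b b' x hr _; simpa using hr
  | succ n ih =>
    intro r r' A b b' x hr hb
    rw [Function.iterate_succ_apply, Function.iterate_succ_apply]
    have hpar : PySem.Int.band b 1 = PySem.Int.band b' 1 := by
      rw [PySem.Int.band_one, PySem.Int.band_one,
        PySem.Int.mod_eq_emod_of_pos (by norm_num : (0:Int) < 2),
        PySem.Int.mod_eq_emod_of_pos (by norm_num : (0:Int) < 2)]
      have d : (2:Int) ∣ 2^(n+1) := by
        exact Dvd.intro (2^n) (by ring)
      calc b % 2 = b % 2^(n+1) % 2 := (Int.emod_emod_of_dvd b d).symm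
        _ = b' % 2^(n+1) % 2 := by rw [hb]
        _ = b' % 2 := Int.emod_emod_of_dvd b' d
    have hstep : gfMulStep (r, A, b) =
        (if PySem.Int.band b 1 ≠ 0 then PySem.Int.bxor r A else r,
         (gfMulStep (r, A, b)).2.1, b >>> (1:Nat)) := rfl
    have hstep' : gfMulStep (r', A, b') =
        (if PySem.Int.band b' 1 ≠ 0 then PySem.Int.bxor r' A else r',
         (gfMulStep (r', A, b')).2.1, b' >>> (1:Nat)) := rfl
    rw [hstep, hstep', gfMulStep_snd r A b r' b']
    apply ih
    · by_cases hc : PySem.Int.band b' 1 ≠ 0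
      · rw [if_pos (by rw [hpar]; exact hc), if_pos hc, hr,
          PySem.Int.bxor_comm r' x, pyBxor_assoc,
          PySem.Int.bxor_comm x (PySem.Int.bxor r' A)]
      · rw [if_neg (by rw [hpar]; exact hc), if_neg hc, hr]
    · rw [int_shr1, int_shr1]
      exact div2_emod (2^n) b b' (by positivity) (by
        have e : (2:Int) * 2^n = 2^(n+1) := by ring
        rw [e]; exact hb)

lemma mulSplit (a b : Int) :
    gf_multiply a b = PySem.Int.bxor
      (gf_multiply (PySem.Int.mod a 256) (PySem.Int.mod b 256))
      (if PySem.Int.band b 1 ≠ 0 then PySem.Int.bxor a (PySem.Int.mod a 256) else 0) := by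
  have hma : PySem.Int.mod a 256 = a % 256 := PySem.Int.mod_eq_emod_of_pos (by norm_num)
  have hmb : PySem.Int.mod b 256 = b % 256 := PySem.Int.mod_eq_emod_of_pos (by norm_num)
  have hpar : PySem.Int.band (PySem.Int.mod b 256) 1 = PySem.Int.band b 1 := by
    rw [PySem.Int.band_one, PySem.Int.band_one, hmb,
      PySem.Int.mod_eq_emod_of_pos (by norm_num : (0:Int) < 2),
      PySem.Int.mod_eq_emod_of_pos (by norm_num : (0:Int) < 2)]
    omega
  have e8 : ∀ st : Int × Int × Int, gfMulStep^[8] st = gfMulStep^[7] (gfMulStep st) :=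
    fun st => by rw [show (8:Nat) = 7+1 from rfl, Function.iterate_succ_apply]
  unfold gf_multiply
  rw [foldRange_eq_iterate, foldRange_eq_iterate, e8, e8]
  have hstep : gfMulStep (0, a, b) =
      (if PySem.Int.band b 1 ≠ 0 then PySem.Int.bxor 0 a else 0,
       (gfMulStep (0, a, b)).2.1, b >>> (1:Nat)) := rfl
  have hstep' : gfMulStep (0, PySem.Int.mod a 256, PySem.Int.mod b 256) =
      (if PySem.Int.band (PySem.Int.mod b 256) 1 ≠ 0
         then PySem.Int.bxor 0 (PySem.Int.mod a 256) else 0,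
       (gfMulStep (0, PySem.Int.mod a 256, PySem.Int.mod b 256)).2.1,
       (PySem.Int.mod b 256) >>> (1:Nat)) := rfl
  have hA : (gfMulStep (0, a, b)).2.1
      = (gfMulStep (0, PySem.Int.mod a 256, PySem.Int.mod b 256)).2.1 := by
    show (if PySem.Int.band a 128 ≠ 0
            then PySem.Int.bxor (PySem.Int.band (a <<< (1:Nat)) 255) (PySem.Int.band 283 255)
            else PySem.Int.band (a <<< (1:Nat)) 255)
        = (if PySem.Int.band (PySem.Int.mod a 256) 128 ≠ 0
            then PySem.Int.bxor (PySem.Int.band ((PySem.Int.mod a 256) <<< (1:Nat)) 255)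
              (PySem.Int.band 283 255)
            else PySem.Int.band ((PySem.Int.mod a 256) <<< (1:Nat)) 255)
    have h1 : PySem.Int.band a 128 = PySem.Int.band (PySem.Int.mod a 256) 128 :=
      int_band_128 a
    have h2 : PySem.Int.band (a <<< (1:Nat)) 255
        = PySem.Int.band ((PySem.Int.mod a 256) <<< (1:Nat)) 255 := by
      rw [int_shl1, int_shl1, int_band_255, int_band_255,
        PySem.Int.mod_eq_emod_of_pos (by norm_num : (0:Int) < 256),
        PySem.Int.mod_eq_emod_of_pos (by norm_num : (0:Int) < 256), hma]
      omega
    rw [h1, h2]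
  rw [hstep, hstep', hA]
  apply roundsInv 7
  · rw [hpar]
    by_cases hc : PySem.Int.band b 1 ≠ 0
    · rw [if_pos hc, if_pos hc, if_pos hc, bxor_zero_left, bxor_zero_left,
        PySem.Int.bxor_comm a (PySem.Int.mod a 256), ← pyBxor_assoc,
        PySem.Int.bxor_self, bxor_zero_left]
    · rw [if_neg hc, if_neg hc, if_neg hc, PySem.Int.bxor_zero]
  · rw [int_shr1, int_shr1, hmb]
    have : ((2:Int)^7) = 128 := by norm_num
    rw [this]
    omega

lemma bxor_byte {x y : Int} (hx : 0 ≤ x ∧ x < 256) (hy : 0 ≤ y ∧ y < 256) :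
    0 ≤ PySem.Int.bxor x y ∧ PySem.Int.bxor x y < 256 := by
  rw [PySem.Int.bxor_of_nonneg hx.1 hy.1]
  have h := Nat.xor_lt_two_pow (x := x.toNat) (y := y.toNat) (n := 8) (by omega) (by omega)
  omega

lemma band255_byte (x : Int) : 0 ≤ PySem.Int.band x 255 ∧ PySem.Int.band x 255 < 256 := by
  rw [int_band_255, PySem.Int.mod_eq_emod_of_pos (by norm_num : (0:Int) < 256)]
  omega

lemma stepInv {st : Int × Int × Int}
    (h : (0 ≤ st.1 ∧ st.1 < 256) ∧ (0 ≤ st.2.1 ∧ st.2.1 < 256)) :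
    (0 ≤ (gfMulStep st).1 ∧ (gfMulStep st).1 < 256) ∧
    (0 ≤ (gfMulStep st).2.1 ∧ (gfMulStep st).2.1 < 256) := by
  obtain ⟨⟨hr0, hr1⟩, hA⟩ := h
  have e1 : (gfMulStep st).1
      = (if PySem.Int.band st.2.2 1 ≠ 0 then PySem.Int.bxor st.1 st.2.1 else st.1) := rfl
  have e2 : (gfMulStep st).2.1
      = (if PySem.Int.band st.2.1 128 ≠ 0
          then PySem.Int.bxor (PySem.Int.band (st.2.1 <<< (1:Nat)) 255) (PySem.Int.band 283 255)
          else PySem.Int.band (st.2.1 <<< (1:Nat)) 255) := rfl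
  constructor
  · rw [e1]
    split_ifs with hc
    · exact bxor_byte ⟨hr0, hr1⟩ hA
    · exact ⟨hr0, hr1⟩
  · rw [e2]
    have hb := band255_byte (st.2.1 <<< (1:Nat))
    have h27 : PySem.Int.band 283 255 = 27 := by decide
    split_ifs with hc
    · rw [h27]
      exact bxor_byte hb (by norm_num)
    · exact hb

lemma iterInv : ∀ (n : Nat) (st : Int × Int × Int),
    (0 ≤ st.1 ∧ st.1 < 256) ∧ (0 ≤ st.2.1 ∧ st.2.1 < 256) →
    (0 ≤ (gfMulStep^[n] st).1 ∧ (gfMulStep^[n] st).1 < 256) ∧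
    (0 ≤ (gfMulStep^[n] st).2.1 ∧ (gfMulStep^[n] st).2.1 < 256) := by
  intro n
  induction n with
  | zero => intro st h; simpa using h
  | succ n ih =>
    intro st h
    rw [Function.iterate_succ_apply]
    exact ih _ (stepInv h)

lemma mulRange (r b : Int) (hr : 0 ≤ r ∧ r < 256) :
    0 ≤ gf_multiply r b ∧ gf_multiply r b < 256 := by
  unfold gf_multiply
  rw [foldRange_eq_iterate]
  exact (iterInv 8 (0, r, b) ⟨by norm_num, hr⟩).1

-- byte-chain value and leak-survival flag
def pvVb (ab : Int) : Nat → Int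
  | 0 => ab
  | n+1 => gf_multiply (gf_multiply (pvVb ab n) (pvVb ab n)) ab

def pvEps (ab : Int) : Nat → Bool
  | 0 => true
  | n+1 => pvEps ab n && decide (PySem.Int.mod (pvVb ab n) 2 = 1)
      && decide (PySem.Int.mod ab 2 = 1)

lemma vbRange (ab : Int) (hab : 0 ≤ ab ∧ ab < 256) :
    ∀ n, 0 ≤ pvVb ab n ∧ pvVb ab n < 256 := by
  intro n
  induction n with
  | zero => exact hab
  | succ n ih => exact mulRange _ ab (mulRange _ _ ih)

lemma squareSplit (q v : Int) (hv : 0 ≤ v ∧ v < 256) :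
    gf_multiply (256*q + v) (256*q + v)
      = if PySem.Int.mod v 2 = 1 then 256*q + gf_multiply v v else gf_multiply v v := by
  have hmod : PySem.Int.mod (256*q + v) 256 = v := by
    rw [PySem.Int.mod_eq_emod_of_pos (by norm_num : (0:Int) < 256)]; omega
  have hpar : PySem.Int.band (256*q + v) 1 ≠ 0 ↔ PySem.Int.mod v 2 = 1 := by
    rw [PySem.Int.band_one,
      PySem.Int.mod_eq_emod_of_pos (by norm_num : (0:Int) < 2),
      PySem.Int.mod_eq_emod_of_pos (by norm_num : (0:Int) < 2)]
    omega
  have hleak : PySem.Int.bxor (256*q + v) v = 256*q := by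
    rw [← int_disj q v hv.1 hv.2, bxor_cancel_right]
  rw [mulSplit, hmod]
  by_cases hc : PySem.Int.mod v 2 = 1
  · rw [if_pos (hpar.mpr hc), if_pos hc, hleak,
      PySem.Int.bxor_comm, int_disj q _ (mulRange v v hv).1 (mulRange v v hv).2]
  · rw [if_neg (fun h => hc (hpar.mp h)), if_neg hc, PySem.Int.bxor_zero]

lemma mulASplit (q v b : Int) (hv : 0 ≤ v ∧ v < 256) :
    gf_multiply (256*q + v) b
      = if PySem.Int.mod b 2 = 1
          then 256*q + gf_multiply v (PySem.Int.mod b 256)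
          else gf_multiply v (PySem.Int.mod b 256) := by
  have hmod : PySem.Int.mod (256*q + v) 256 = v := by
    rw [PySem.Int.mod_eq_emod_of_pos (by norm_num : (0:Int) < 256)]; omega
  have hpar : PySem.Int.band b 1 ≠ 0 ↔ PySem.Int.mod b 2 = 1 := by
    rw [PySem.Int.band_one,
      PySem.Int.mod_eq_emod_of_pos (by norm_num : (0:Int) < 2)]
    omega
  have hleak : PySem.Int.bxor (256*q + v) v = 256*q := by
    rw [← int_disj q v hv.1 hv.2, bxor_cancel_right]
  have hW := mulRange v (PySem.Int.mod b 256) hv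
  rw [mulSplit, hmod]
  by_cases hc : PySem.Int.mod b 2 = 1
  · rw [if_pos (hpar.mpr hc), if_pos hc, hleak, PySem.Int.bxor_comm,
      int_disj q _ hW.1 hW.2]
  · rw [if_neg (fun h => hc (hpar.mp h)), if_neg hc, PySem.Int.bxor_zero]

lemma chainLemma (a : Int) : ∀ n : Nat,
    (List.range n).foldl (fun r _ => gf_multiply (gf_multiply r r) a) a
      = if pvEps (PySem.Int.mod a 256) n
          then 256*(a/256) + pvVb (PySem.Int.mod a 256) n
          else pvVb (PySem.Int.mod a 256) n := by
  have hab : PySem.Int.mod a 256 = a % 256 :=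
    PySem.Int.mod_eq_emod_of_pos (by norm_num)
  have habr : 0 ≤ PySem.Int.mod a 256 ∧ PySem.Int.mod a 256 < 256 := by rw [hab]; omega
  have hdecomp : a = 256*(a/256) + PySem.Int.mod a 256 := by rw [hab]; omega
  have hpar : (PySem.Int.mod a 2 = 1) ↔ (PySem.Int.mod (PySem.Int.mod a 256) 2 = 1) := by
    rw [hab, PySem.Int.mod_eq_emod_of_pos (by norm_num : (0:Int) < 2),
      PySem.Int.mod_eq_emod_of_pos (by norm_num : (0:Int) < 2)]
    omega
  intro n
  induction n with
  | zero =>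
    show a = _
    rw [pvEps, pvVb, if_pos rfl]
    exact hdecomp
  | succ n ih =>
    rw [List.range_succ, List.foldl_append, ih]
    show gf_multiply (gf_multiply _ _) a = _
    set v := pvVb (PySem.Int.mod a 256) n with hvdef
    have hv : 0 ≤ v ∧ v < 256 := vbRange _ habr n
    have hW := mulRange v v hv
    have hvb1 : pvVb (PySem.Int.mod a 256) (n+1)
        = gf_multiply (gf_multiply v v) (PySem.Int.mod a 256) := rfl
    have heps1 : pvEps (PySem.Int.mod a 256) (n+1)
        = (pvEps (PySem.Int.mod a 256) n && decide (PySem.Int.mod v 2 = 1)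
            && decide (PySem.Int.mod (PySem.Int.mod a 256) 2 = 1)) := rfl
    by_cases he : pvEps (PySem.Int.mod a 256) n
    · rw [if_pos he]
      rw [squareSplit (a/256) v hv]
      by_cases hodd : PySem.Int.mod v 2 = 1
      · rw [if_pos hodd, mulASplit (a/256) _ a hW]
        by_cases ha2 : PySem.Int.mod a 2 = 1
        · have hT : pvEps (PySem.Int.mod a 256) (n+1) = true := by
            rw [heps1, he, decide_eq_true hodd, decide_eq_true (hpar.mp ha2)]
            rfl
          rw [if_pos ha2, hvb1, if_pos hT]
        · have hF : pvEps (PySem.Int.mod a 256) (n+1) = false := by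
            rw [heps1, decide_eq_false (fun h => ha2 (hpar.mpr h)), Bool.and_false]
          rw [if_neg ha2, hvb1, if_neg (by rw [hF]; exact Bool.false_ne_true)]
      · have hF : pvEps (PySem.Int.mod a 256) (n+1) = false := by
          rw [heps1, decide_eq_false hodd, Bool.and_false, Bool.false_and]
        rw [if_neg hodd]
        have hm := mulASplit 0 (gf_multiply v v) a hW
        rw [mul_zero, zero_add, zero_add] at hm
        rw [hm, ite_self, hvb1, if_neg (by rw [hF]; exact Bool.false_ne_true)]
    · have he' : pvEps (PySem.Int.mod a 256) n = false := by
        revert he; cases pvEps (PySem.Int.mod a 256) n <;> simp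
      have hF : pvEps (PySem.Int.mod a 256) (n+1) = false := by
        rw [heps1, he', Bool.false_and, Bool.false_and]
      rw [if_neg he]
      have hm := mulASplit 0 (gf_multiply v v) a hW
      rw [mul_zero, zero_add, zero_add] at hm
      rw [hm, ite_self, hvb1, if_neg (by rw [hF]; exact Bool.false_ne_true)]

def pvEpsFin (ab : Int) : Bool :=
  pvEps ab 6 && decide (PySem.Int.mod (pvVb ab 6) 2 = 1)

lemma mainSplit (a : Int) (ha : a ≠ 0) :
    gf_inverse a = if pvEpsFin (PySem.Int.mod a 256)
      then 256*(a/256) + gf_multiply (pvVb (PySem.Int.mod a 256) 6) (pvVb (PySem.Int.mod a 256) 6)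
      else gf_multiply (pvVb (PySem.Int.mod a 256) 6) (pvVb (PySem.Int.mod a 256) 6) := by
  have hab : PySem.Int.mod a 256 = a % 256 :=
    PySem.Int.mod_eq_emod_of_pos (by norm_num)
  have habr : 0 ≤ PySem.Int.mod a 256 ∧ PySem.Int.mod a 256 < 256 := by rw [hab]; omega
  have hv := vbRange _ habr 6
  show (if a = 0 then 0 else _) = _
  rw [if_neg ha, chainLemma a 6]
  by_cases he : pvEps (PySem.Int.mod a 256) 6
  · rw [if_pos he, squareSplit (a/256) _ hv]
    by_cases hodd : PySem.Int.mod (pvVb (PySem.Int.mod a 256) 6) 2 = 1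
    · rw [if_pos hodd,
        if_pos (show pvEpsFin (PySem.Int.mod a 256) = true by
          rw [pvEpsFin, he, decide_eq_true hodd]; rfl)]
    · rw [if_neg hodd,
        if_neg (by rw [pvEpsFin, decide_eq_false hodd, Bool.and_false]
                   exact Bool.false_ne_true)]
  · have he' : pvEps (PySem.Int.mod a 256) 6 = false := by
      revert he; cases pvEps (PySem.Int.mod a 256) 6 <;> simp
    rw [if_neg he,
      if_neg (by rw [pvEpsFin, he', Bool.false_and]; exact Bool.false_ne_true)]

set_option maxRecDepth 2048 in
lemma byteInv (ab : Int) (habr : 0 ≤ ab ∧ ab < 256) :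
    gf_multiply (pvVb ab 6) (pvVb ab 6) = gf_inverse ab := by
  by_cases h0 : ab = 0
  · rw [h0]; decide
  · have hmod : PySem.Int.mod ab 256 = ab := by
      rw [PySem.Int.mod_eq_emod_of_pos (by norm_num : (0:Int) < 256)]; omega
    have hq : ab / 256 = 0 := by omega
    show _ = (if ab = 0 then 0 else _)
    rw [if_neg h0, chainLemma ab 6, hmod, hq, mul_zero, zero_add, ite_self]

lemma mainInv (a : Int) (ha : a ≠ 0) :
    gf_inverse a = if pvEpsFin (PySem.Int.mod a 256)
      then 256*(a/256) + gf_inverse (PySem.Int.mod a 256)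
      else gf_inverse (PySem.Int.mod a 256) := by
  have hab : PySem.Int.mod a 256 = a % 256 :=
    PySem.Int.mod_eq_emod_of_pos (by norm_num)
  have habr : 0 ≤ PySem.Int.mod a 256 ∧ PySem.Int.mod a 256 < 256 := by rw [hab]; omega
  rw [mainSplit a ha, byteInv _ habr]

lemma alt_mod (a : Int) : gf_inverse_alt a = gf_inverse_alt (PySem.Int.mod a 256) := by
  show (let ab := PySem.Int.band a 0xFF; if ab = 0 then 0 else eeaLoop 64 0x11B ab 0 1)
     = (let ab := PySem.Int.band (PySem.Int.mod a 256) 0xFF;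
        if ab = 0 then 0 else eeaLoop 64 0x11B ab 0 1)
  have h : PySem.Int.band a 0xFF = PySem.Int.band (PySem.Int.mod a 256) 0xFF := by
    rw [int_band_255, int_band_255,
      PySem.Int.mod_eq_emod_of_pos (by norm_num : (0:Int) < 256),
      PySem.Int.mod_eq_emod_of_pos (by norm_num : (0:Int) < 256)]
    omega
  simp only [h]

set_option maxRecDepth 16384 in
set_option maxHeartbeats 8000000 in
lemma bytes_agree :
    ((List.range 256).all fun n => gf_inverse (n : Int) == gf_inverse_alt (n : Int)) = true := by
  decide

set_option maxRecDepth 16384 in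
set_option maxHeartbeats 8000000 in
lemma eps_S :
    ((List.range 256).all fun n =>
      pvEpsFin (n : Int) == decide ((n : Int) ∈ ([1,41,65,73,81,93,189,255] : List Int))) = true := by
  decide

-- ===== VERDICT =====
theorem gf_inverse_spec : Claim_equal_gf_inverse := by
  intro a _ hpre
  have hab : PySem.Int.mod a 256 = a % 256 :=
    PySem.Int.mod_eq_emod_of_pos (by norm_num)
  show gf_inverse a = gf_inverse_alt a
  by_cases hbyte : 0 ≤ a ∧ a < 256
  · obtain ⟨n, rfl⟩ : ∃ n : Nat, a = (n : Int) := ⟨a.toNat, by omega⟩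
    have hn : n < 256 := by omega
    exact beq_iff_eq.mp (List.all_eq_true.mp bytes_agree n (List.mem_range.mpr hn))
  · have hmem : a % 256 ∉ ([1,41,65,73,81,93,189,255] : List Int) :=
      hpre.resolve_left hbyte
    have habr : 0 ≤ PySem.Int.mod a 256 ∧ PySem.Int.mod a 256 < 256 := by rw [hab]; omega
    obtain ⟨m, hm⟩ : ∃ m : Nat, PySem.Int.mod a 256 = (m : Int) :=
      ⟨(PySem.Int.mod a 256).toNat, by omega⟩
    have hm256 : m < 256 := by omega
    have hepsF : pvEpsFin (PySem.Int.mod a 256) = false := by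
      rw [hm]
      rw [beq_iff_eq.mp (List.all_eq_true.mp eps_S m (List.mem_range.mpr hm256)),
        decide_eq_false (by rw [← hm, hab]; exact hmem)]
    have ha0 : a ≠ 0 := by
      intro h; apply hbyte; omega
    rw [mainInv a ha0, hepsF, if_neg Bool.false_ne_true]
    rw [alt_mod a, hm]
    exact beq_iff_eq.mp
      (List.all_eq_true.mp bytes_agree m (List.mem_range.mpr hm256))
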